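-- pv_equiv track=rewrite | github.com/tianyi-stack/MadEvolve | madevolve/transformer/patcher.py | _find_fuzzy_match
-- ===== SOURCE A (Python) =====
-- from typing import List, Optional, Tuple
--
-- def _find_fuzzy_match(
--     code_lines: List[str],
--     search_normalized: List[str],
-- ) -> Tuple[Optional[int], Optional[int]]:
--     """
--     Find fuzzy match for normalized search text.
--
--     Args:
--         code_lines: Lines of code
--         search_normalized: Normalized search lines
--
--     Returns:
--         Tuple of (start_line, end_line) or (None, None)
--     """
--     if not search_normalized:
--         return None, None
--
--     code_normalized = [line.strip() for line in code_lines]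
--     search_len = len(search_normalized)
--
--     for i in range(len(code_normalized) - search_len + 1):
--         # Check if this position matches
--         match = True
--         for j in range(search_len):
--             if code_normalized[i + j] != search_normalized[j]:
--                 match = False
--                 break
--
--         if match:
--             # Find actual line range (accounting for blank lines)
--             start = i
--             end = i + search_len - 1
--
--             return start, end
--
--     return None, None
-- ===== SOURCE B (Python) =====
-- from typing import List, Optional, Tuple
--
-- def _find_fuzzy_match(
--     code_lines: List[str],
--     search_normalized: List[str],
-- ) -> Tuple[Optional[int], Optional[int]]:
--     if not search_normalized:
--         return None, None
--     norm = [line.strip() for line in code_lines]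
--     # index: stripped line -> list of positions where it occurs
--     index = {}
--     for pos, line in enumerate(norm):
--         index.setdefault(line, []).append(pos)
--     first = search_normalized[0]
--     search_len = len(search_normalized)
--     limit = len(norm) - search_len
--     for i in index.get(first, []):
--         if i <= limit and norm[i:i + search_len] == search_normalized:
--             return i, i + search_len - 1
--     return None, None
-- ===== Notes on version B (the rewrite author's own statement) =====
-- stated objective: alternative
-- what changed: Replaces A's nested scan of every window start with an index dictionary from stripped line to its positions built in one pass; only positions of the first search line are tried, each verified by a single whole-slice comparison.
import Mathlib
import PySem

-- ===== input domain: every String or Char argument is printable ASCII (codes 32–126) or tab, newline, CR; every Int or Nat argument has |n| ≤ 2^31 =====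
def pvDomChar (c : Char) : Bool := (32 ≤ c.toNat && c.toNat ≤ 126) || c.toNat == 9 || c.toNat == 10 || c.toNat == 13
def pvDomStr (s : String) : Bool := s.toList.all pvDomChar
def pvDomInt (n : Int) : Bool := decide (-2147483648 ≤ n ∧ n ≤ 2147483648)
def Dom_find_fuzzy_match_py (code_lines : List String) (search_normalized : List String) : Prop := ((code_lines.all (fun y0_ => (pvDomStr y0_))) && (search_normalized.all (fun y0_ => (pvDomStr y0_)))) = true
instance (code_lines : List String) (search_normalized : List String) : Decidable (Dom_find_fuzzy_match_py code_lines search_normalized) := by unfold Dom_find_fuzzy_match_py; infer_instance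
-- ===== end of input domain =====

-- B replaces A's scan of every window start by a dictionary from stripped line to its
-- positions, built once; only positions of the first search line are tried, each checked
-- by one whole-slice comparison (objective: alternative; same worst-case cost).

-- ===== PORT A =====
-- inner 'for j in range(search_len)' loop with early break
def pvA_matchLoop (code search : List String) (i : Int) : List Int → Bool
  | [] => true
  | j :: js =>
    if PySem.List.pyGet? code (i + j) ≠ PySem.List.pyGet? search j then false
    else pvA_matchLoop code search i js

-- outer 'for i in range(...)' loop with early return
def pvA_outer (code search : List String) : List Int → Option Int × Option Int
  | [] => (none, none)
  | i :: is =>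
    if pvA_matchLoop code search i (PySem.List.pyRange 0 (search.length : Int) 1)
    then (some i, some (i + (search.length : Int) - 1))
    else pvA_outer code search is

def find_fuzzy_match_py (code_lines : List String) (search_normalized : List String) : Option Int × Option Int :=
  if search_normalized = [] then (none, none)
  else
    let code_normalized := code_lines.map PySem.Str.strip
    let search_len : Int := (search_normalized.length : Int)
    pvA_outer code_normalized search_normalized
      (PySem.List.pyRange 0 ((code_normalized.length : Int) - search_len + 1) 1)

-- ===== PORT B =====
-- 'for pos, line in enumerate(norm): index.setdefault(line, []).append(pos)'
def pvB_index (norm : List String) : PySem.Dict String (List Int) :=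
  (PySem.List.enumerate norm 0).foldl
    (fun d p => d.modify p.2 [] (fun l => l ++ [p.1])) PySem.Dict.empty

-- 'for i in index.get(first, []): …' with early return
def pvB_scan (norm search : List String) (limit : Int) : List Int → Option Int × Option Int
  | [] => (none, none)
  | i :: is =>
    if i ≤ limit ∧ PySem.List.slice norm (some i) (some (i + (search.length : Int))) = search
    then (some i, some (i + (search.length : Int) - 1))
    else pvB_scan norm search limit is

def find_fuzzy_match_py_alt (code_lines : List String) (search_normalized : List String) : Option Int × Option Int :=
  match search_normalized with
  | [] => (none, none)
  | first :: rest =>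
    let norm := code_lines.map PySem.Str.strip
    let index := pvB_index norm
    let limit : Int := (norm.length : Int) - ((first :: rest).length : Int)
    pvB_scan norm (first :: rest) limit (index.getD first [])

-- ===== PRECONDITION & SPEC =====
def Spec_find_fuzzy_match_py (code_lines : List String) (search_normalized : List String) (out : Option Int × Option Int) : Prop := out = find_fuzzy_match_py_alt code_lines search_normalized
instance (code_lines : List String) (search_normalized : List String) (out : Option Int × Option Int) : Decidable (Spec_find_fuzzy_match_py code_lines search_normalized out) := by unfold Spec_find_fuzzy_match_py; infer_instance

-- ===== CLAIM (what is proved, stated in full; the proofs are below) =====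
def Claim_equal_find_fuzzy_match_py : Prop := ∀ (code_lines : List String) (search_normalized : List String), Dom_find_fuzzy_match_py code_lines search_normalized → Spec_find_fuzzy_match_py code_lines search_normalized (find_fuzzy_match_py code_lines search_normalized)

-- ===== LEMMAS AND PROOFS =====

-- the inner loop is an 'all' over its index list
theorem pvA_matchLoop_eq_all (code search : List String) (i : Int) (js : List Int) :
    pvA_matchLoop code search i js
      = js.all (fun j => PySem.List.pyGet? code (i + j) == PySem.List.pyGet? search j) := by
  induction js with
  | nil => rfl
  | cons j js ih =>
    simp only [pvA_matchLoop, List.all_cons, ih]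
    by_cases h : PySem.List.pyGet? code (i + j) = PySem.List.pyGet? search j
    · simp [h]
    · simp [h]

-- pointwise characterisation of slice equality (Nat level)
theorem slice_eq_iff_pointwise (norm search : List String) (k : Nat) :
    (norm.drop k).take search.length = search
      ↔ ∀ j, j < search.length → norm[k + j]? = search[j]? := by
  constructor
  · intro h j hj
    rw [← h]
    simp [List.getElem?_drop, hj]
  · intro h
    apply List.ext_getElem?
    intro j
    by_cases hj : j < search.length
    · simp [List.getElem?_drop, hj, h j hj]
    · have h1 : ((norm.drop k).take search.length)[j]? = none := by
        simp [hj]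
      have h2 : search[j]? = none := by
        exact List.getElem?_eq_none (by omega)
      rw [h1, h2]

-- A's window test equals B's window test, for every nonnegative start
theorem test_eq (norm : List String) (first : String) (rest : List String) (i : Int)
    (hi : 0 ≤ i) :
    (pvA_matchLoop norm (first :: rest) i
        (PySem.List.pyRange 0 (((first :: rest).length : Int)) 1) = true)
      ↔ (i ≤ (norm.length : Int) - ((first :: rest).length : Int) ∧
         PySem.List.slice norm (some i) (some (i + ((first :: rest).length : Int)))
           = first :: rest) := by
  set search := first :: rest with hsearch
  obtain ⟨k, rfl⟩ : ∃ k : Nat, i = (k : Int) := ⟨i.toNat, (Int.toNat_of_nonneg hi).symm⟩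
  rw [pvA_matchLoop_eq_all, PySem.List.slice_natCast_add norm k search.length,
    List.all_eq_true]
  have hmem : ∀ x : Int, x ∈ PySem.List.pyRange 0 (search.length : Int) 1 ↔
      0 ≤ x ∧ x < (search.length : Int) := fun x => PySem.List.mem_pyRange_one
  constructor
  · intro h
    have hpt : ∀ j, j < search.length → norm[k + j]? = search[j]? := by
      intro j hj
      have := h (j : Int) ((hmem j).2 ⟨Int.natCast_nonneg j, by exact_mod_cast hj⟩)
      have : PySem.List.pyGet? norm ((k : Int) + (j : Int)) = PySem.List.pyGet? search (j : Int) := by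
        simpa using this
      rw [show ((k : Int) + (j : Int)) = ((k + j : Nat) : Int) by push_cast; ring,
        PySem.List.pyGet?_natCast, PySem.List.pyGet?_natCast] at this
      exact this
    have hslice := (slice_eq_iff_pointwise norm search k).2 hpt
    refine ⟨?_, hslice⟩
    have hlen : 0 < search.length := by simp [hsearch]
    have hlast := hpt (search.length - 1) (by omega)
    have : k + (search.length - 1) < norm.length := by
      by_contra hc
      rw [List.getElem?_eq_none (by omega)] at hlast
      have hs := List.getElem?_eq_none_iff.1 hlast.symm
      omega
    omega
  · rintro ⟨hle, hslice⟩
    intro j hj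
    obtain ⟨jn, rfl⟩ : ∃ jn : Nat, j = (jn : Int) := by
      have := ((hmem j).1 hj).1
      exact ⟨j.toNat, (Int.toNat_of_nonneg this).symm⟩
    have hjn : jn < search.length := by
      have := ((hmem jn).1 hj).2; exact_mod_cast this
    have := (slice_eq_iff_pointwise norm search k).1 hslice jn hjn
    rw [show ((k : Int) + (jn : Int)) = ((k + jn : Nat) : Int) by push_cast; ring,
      PySem.List.pyGet?_natCast, PySem.List.pyGet?_natCast, this]
    simp

-- A's loop over any list of nonnegative starts is B's loop over the same list
theorem scan_congr (norm : List String) (first : String) (rest : List String)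
    (is : List Int) (h : ∀ i ∈ is, 0 ≤ i) :
    pvA_outer norm (first :: rest) is
      = pvB_scan norm (first :: rest) ((norm.length : Int) - ((first :: rest).length : Int)) is := by
  induction is with
  | nil => rfl
  | cons i is ih =>
    have hi : 0 ≤ i := h i (List.mem_cons_self)
    have ht := test_eq norm first rest i hi
    simp only [pvA_outer, pvB_scan]
    by_cases hb : i ≤ (norm.length : Int) - ((first :: rest).length : Int) ∧
        PySem.List.slice norm (some i) (some (i + ((first :: rest).length : Int))) = first :: rest
    · rw [if_pos (ht.2 hb), if_pos hb]
    · rw [if_neg (fun hm => hb (ht.1 hm)), if_neg hb]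
      exact ih (fun x hx => h x (List.mem_cons_of_mem _ hx))

-- dropping starts that can never satisfy the window test does not change the scan
theorem scan_filter (norm : List String) (search : List String) (limit : Int)
    (p : Int → Bool) (is : List Int)
    (h : ∀ i ∈ is,
      (i ≤ limit ∧ PySem.List.slice norm (some i) (some (i + (search.length : Int))) = search)
        → p i = true) :
    pvB_scan norm search limit is = pvB_scan norm search limit (is.filter p) := by
  induction is with
  | nil => rfl
  | cons i is ih =>
    have hih := ih (fun x hx => h x (List.mem_cons_of_mem _ hx))
    by_cases hp : p i = true
    · rw [List.filter_cons_of_pos hp]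
      simp only [pvB_scan]
      split_ifs with hc
      · rfl
      · exact hih
    · rw [List.filter_cons_of_neg (by simpa using hp)]
      have hc : ¬ (i ≤ limit ∧
          PySem.List.slice norm (some i) (some (i + (search.length : Int))) = search) :=
        fun hcc => hp (h i (List.mem_cons_self) hcc)
      simp only [pvB_scan, if_neg hc]
      exact hih

-- lookup in the fold that builds the index
theorem getD_index_fold (xs : List String) :
    ∀ (s : Int) (d : PySem.Dict String (List Int)) (v : String),
    ((PySem.List.enumerate xs s).foldl
        (fun d p => d.modify p.2 [] (fun l => l ++ [p.1])) d).getD v []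
      = d.getD v []
        ++ (PySem.List.enumerate xs s).filterMap
            (fun p => if p.2 == v then some p.1 else none) := by
  induction xs with
  | nil => intro s d v; simp [PySem.List.enumerate_nil]
  | cons x xs ih =>
    intro s d v
    rw [PySem.List.enumerate_cons]
    simp only [List.foldl_cons, List.filterMap_cons]
    rw [ih]
    by_cases hv : x = v
    · subst hv
      rw [PySem.Dict.getD_modify_self]
      simp
    · rw [PySem.Dict.getD_modify_of_ne d [] _ (Ne.symm hv)]
      simp [hv]

-- the positions recorded for v are the matching indices of the range, in order
theorem candAux (v : String) (xs : List String) :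
    ∀ (s : Nat),
    (PySem.List.enumerate xs (s : Int)).filterMap
        (fun p => if p.2 == v then some p.1 else none)
      = ((List.range xs.length).filter (fun k => xs[k]? == some v)).map
          (fun k => ((s + k : Nat) : Int)) := by
  induction xs with
  | nil => intro s; simp [PySem.List.enumerate_nil]
  | cons x xs ih =>
    intro s
    rw [PySem.List.enumerate_cons, List.filterMap_cons]
    have hcast : (s : Int) + 1 = ((s + 1 : Nat) : Int) := by push_cast; ring
    rw [hcast, ih (s + 1)]
    simp only [List.length_cons, List.range_succ_eq_map, List.filter_cons,
      List.getElem?_cons_zero]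
    have hsucc : (fun k => (x :: xs)[k]? == some v) ∘ Nat.succ = fun k => xs[k]? == some v := by
      funext k; simp
    by_cases hv : x = v
    · subst hv
      simp only [beq_self_eq_true, if_true, List.filter_map, List.map_map, hsucc, List.map_cons]
      refine congrArg₂ List.cons (by norm_num) ?_
      apply List.map_congr_left
      intro k _
      simp only [Function.comp]
      congr 1
      omega
    · have hb : ((x == v) : Bool) = false := by simp [hv]
      simp only [hb, Bool.false_eq_true, if_false]
      rw [if_neg (by simp [hv])]
      rw [List.filter_map, List.map_map, hsucc]
      apply List.map_congr_left
      intro k _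
      simp only [Function.comp]
      congr 1
      omega

def pvCand (norm : List String) (first : String) : List Nat :=
  (List.range norm.length).filter (fun k => norm[k]? == some first)

theorem index_getD_eq (norm : List String) (first : String) :
    (pvB_index norm).getD first [] = (pvCand norm first).map (fun k : Nat => (k : Int)) := by
  unfold pvB_index pvCand
  rw [getD_index_fold norm 0 PySem.Dict.empty first]
  have h0 : ((0 : Nat) : Int) = (0 : Int) := by norm_num
  rw [← h0, candAux first norm 0]
  rw [PySem.Dict.getD_empty, List.nil_append]
  apply List.map_congr_left
  intro k _
  norm_num

-- a filter whose predicate bounds its members can be taken over either range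
theorem filter_range_le (a c : Nat) (q : Nat → Bool) (hca : c ≤ a)
    (h : ∀ k, q k = true → k < c) :
    (List.range a).filter q = (List.range c).filter q := by
  have : a = c + (a - c) := by omega
  rw [this, List.range_add, List.filter_append]
  have : ((List.range (a - c)).map (fun x => c + x)).filter q = [] := by
    rw [List.filter_eq_nil_iff]
    intro x hx
    simp only [List.mem_map] at hx
    obtain ⟨y, _, rfl⟩ := hx
    intro hq
    have := h _ hq
    omega
  rw [this, List.append_nil]

theorem filter_range_eq (a b : Nat) (q : Nat → Bool)
    (h : ∀ k, q k = true → k < a ∧ k < b) :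
    (List.range a).filter q = (List.range b).filter q := by
  rcases Nat.le_total a b with hab | hab
  · rw [filter_range_le b a q hab (fun k hk => (h k hk).1)]
  · rw [filter_range_le a b q hab (fun k hk => (h k hk).2)]

-- matching windows start with the first search line
theorem slice_match_head (norm : List String) (first : String) (rest : List String)
    (k : Nat)
    (hslice : PySem.List.slice norm (some (k : Int))
        (some ((k : Int) + (((first :: rest).length : Nat) : Int))) = first :: rest) :
    norm[k]? = some first := by
  rw [PySem.List.slice_natCast_add] at hslice
  have := (slice_eq_iff_pointwise norm (first :: rest) k).1 hslice 0 (by simp)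
  simpa using this

-- ===== VERDICT (by name: the statement is the Claim_ definition above) =====
theorem find_fuzzy_match_py_spec : Claim_equal_find_fuzzy_match_py := by
  intro code_lines search_normalized _
  unfold Spec_find_fuzzy_match_py
  match search_normalized with
  | [] => rfl
  | first :: rest =>
    simp only [find_fuzzy_match_py, find_fuzzy_match_py_alt, if_neg (List.cons_ne_nil first rest)]
    set norm := code_lines.map PySem.Str.strip with hnorm
    set search := first :: rest with hsearch
    set L : Int := (search.length : Int) with hL
    set limit : Int := (norm.length : Int) - L with hlimit
    -- common filter predicate: position matches first line and fits before the limit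
    set p : Int → Bool :=
      fun i => (PySem.List.pyGet? norm i == some first) && decide (i ≤ limit) with hp
    have htestp : ∀ (i : Int), 0 ≤ i →
        (i ≤ limit ∧ PySem.List.slice norm (some i) (some (i + L)) = search) → p i = true := by
      intro i hi ⟨h1, h2⟩
      obtain ⟨k, rfl⟩ : ∃ k : Nat, i = (k : Int) := ⟨i.toNat, (Int.toNat_of_nonneg hi).symm⟩
      have := slice_match_head norm first rest k (by simpa [hL] using h2)
      simp [hp, h1, PySem.List.pyGet?_natCast, this]
    -- the A side
    have hA : pvA_outer norm search (PySem.List.pyRange 0 ((norm.length : Int) - L + 1) 1)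
        = pvB_scan norm search limit
            ((PySem.List.pyRange 0 ((norm.length : Int) - L + 1) 1).filter p) := by
      rw [scan_congr norm first rest _
        (fun i hi => (PySem.List.mem_pyRange_one.1 hi).1)]
      exact scan_filter norm search limit p _
        (fun i hi => htestp i (PySem.List.mem_pyRange_one.1 hi).1)
    -- the B side
    have hB : pvB_scan norm search limit ((pvB_index norm).getD first [])
        = pvB_scan norm search limit
            (((pvCand norm first).map (fun k : Nat => (k : Int))).filter p) := by
      rw [index_getD_eq]
      exact scan_filter norm search limit p _
        (fun i hi => htestp i (by
          obtain ⟨k, -, rfl⟩ := List.mem_map.1 hi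
          exact Int.natCast_nonneg k))
    rw [hA, hB]
    -- now the two filtered lists coincide
    congr 1
    rw [PySem.List.pyRange_zero, List.filter_map, List.filter_map]
    unfold pvCand
    rw [List.filter_filter]
    have hL1 : 1 ≤ L := by
      have : 0 < search.length := by rw [hsearch]; simp
      omega
    have hcongr : ∀ k ∈ List.range norm.length,
        ((p ∘ fun k : Nat => (k : Int)) k && (norm[k]? == some first))
          = (p ∘ fun k : Nat => (k : Int)) k := by
      intro k _
      simp only [Function.comp, hp, PySem.List.pyGet?_natCast]
      by_cases h1 : (norm[k]? == some first) = true
      · simp [h1]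
      · simp at h1
        simp [h1]
    rw [List.filter_congr hcongr]
    congr 1
    apply filter_range_eq
    intro k hk
    simp only [Function.comp, hp, PySem.List.pyGet?_natCast, Bool.and_eq_true,
      beq_iff_eq, decide_eq_true_eq] at hk
    have h1 : (k : Int) ≤ limit := hk.2
    rw [hlimit] at h1
    constructor
    · omega
    · omega
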